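-- pv_equiv track=rewrite | github.com/Arthurrre/TIPE_Automate | ancien_automate.py | old_cases_touchees
-- ===== SOURCE A (Python) =====
-- def old_cases_touchees(x, y, rayon, minx, maxx, miny, maxy):
--     coords = []
--
--     for i in range(max(minx, x - rayon), min(maxx, x + rayon + 1)):
--         for j in range(max(miny, y - rayon), min(maxy, y + rayon + 1)):
--             if j == y and i == x:
--                 continue
--             coords.append((i, j))
--
--     return coords
-- ===== SOURCE B (Python) =====
-- def old_cases_touchees(x, y, rayon, minx, maxx, miny, maxy):
--     lo_i, hi_i = max(minx, x - rayon), min(maxx, x + rayon + 1)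
--     lo_j, hi_j = max(miny, y - rayon), min(maxy, y + rayon + 1)
--
--     def row(i, a, b):
--         return [(i, j) for j in range(a, b)]
--
--     out = []
--     for i in range(lo_i, min(hi_i, x)):               # rows strictly below the center row
--         out += row(i, lo_j, hi_j)
--     for i in range(max(lo_i, x), min(hi_i, x + 1)):   # the center row, iff it lies in the box
--         out += row(i, lo_j, min(hi_j, y)) + row(i, max(lo_j, y + 1), hi_j)
--     for i in range(max(lo_i, x + 1), hi_i):           # rows strictly above the center row
--         out += row(i, lo_j, hi_j)
--     return out
-- ===== Notes on version B (the rewrite author's own statement) =====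
-- stated objective: alternative
-- what changed: B never tests individual cells: it emits three pre-computed segments by pure range clamping (rows below the center row, the center row as two column ranges around y, rows above), with no per-cell skip test and no branches.
import Mathlib
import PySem

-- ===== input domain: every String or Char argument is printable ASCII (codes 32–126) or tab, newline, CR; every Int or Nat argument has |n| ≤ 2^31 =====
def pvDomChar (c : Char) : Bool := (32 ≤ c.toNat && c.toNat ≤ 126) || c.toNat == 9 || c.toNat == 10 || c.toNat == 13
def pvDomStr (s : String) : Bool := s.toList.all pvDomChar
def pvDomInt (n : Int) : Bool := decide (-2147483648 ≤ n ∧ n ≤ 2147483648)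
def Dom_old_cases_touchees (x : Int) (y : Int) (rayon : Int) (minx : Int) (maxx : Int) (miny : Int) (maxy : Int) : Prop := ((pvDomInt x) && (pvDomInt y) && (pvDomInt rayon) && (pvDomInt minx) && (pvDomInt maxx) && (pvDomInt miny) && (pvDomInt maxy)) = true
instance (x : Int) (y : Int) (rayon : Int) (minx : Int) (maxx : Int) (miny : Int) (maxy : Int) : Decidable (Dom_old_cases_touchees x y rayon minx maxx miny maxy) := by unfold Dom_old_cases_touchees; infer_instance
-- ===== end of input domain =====

-- B emits three pre-computed segments by range clamping (rows below x, the center row as two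
-- column ranges around y, rows above x) with no per-cell test; A's nested loops skip the center
-- cell per iteration. Same return value on all inputs (both are total).

-- ===== PORT A =====
-- literal transliteration: two nested for-loops over range(...), 'continue' on the center, append otherwise
def old_cases_touchees (x : Int) (y : Int) (rayon : Int) (minx : Int) (maxx : Int) (miny : Int) (maxy : Int) : List (Int × Int) :=
  (PySem.List.pyRange (max minx (x - rayon)) (min maxx (x + rayon + 1)) 1).foldl
    (fun coords i =>
      (PySem.List.pyRange (max miny (y - rayon)) (min maxy (y + rayon + 1)) 1).foldl
        (fun coords j => if j = y ∧ i = x then coords else coords ++ [(i, j)]) coords)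
    []

-- ===== PORT B =====
-- literal transliteration of Source B: 'row(i,a,b)' = map over pyRange; each 'out += …' loop is a foldl
def old_cases_touchees_alt (x : Int) (y : Int) (rayon : Int) (minx : Int) (maxx : Int) (miny : Int) (maxy : Int) : List (Int × Int) :=
  let loI := max minx (x - rayon); let hiI := min maxx (x + rayon + 1)
  let loJ := max miny (y - rayon); let hiJ := min maxy (y + rayon + 1)
  let row := fun (i a b : Int) => (PySem.List.pyRange a b 1).map (fun j => (i, j))
  let out := (PySem.List.pyRange loI (min hiI x) 1).foldl (fun out i => out ++ row i loJ hiJ) []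
  let out := (PySem.List.pyRange (max loI x) (min hiI (x + 1)) 1).foldl
    (fun out i => out ++ (row i loJ (min hiJ y) ++ row i (max loJ (y + 1)) hiJ)) out
  (PySem.List.pyRange (max loI (x + 1)) hiI 1).foldl (fun out i => out ++ row i loJ hiJ) out

-- ===== PRECONDITION & SPEC =====
def Spec_old_cases_touchees (x : Int) (y : Int) (rayon : Int) (minx : Int) (maxx : Int) (miny : Int) (maxy : Int) (out : List (Int × Int)) : Prop := out = old_cases_touchees_alt x y rayon minx maxx miny maxy
instance (x : Int) (y : Int) (rayon : Int) (minx : Int) (maxx : Int) (miny : Int) (maxy : Int) (out : List (Int × Int)) : Decidable (Spec_old_cases_touchees x y rayon minx maxx miny maxy out) := by unfold Spec_old_cases_touchees; infer_instance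

-- ===== CLAIM (what is proved, stated in full; the proofs are below) =====
def Claim_equal_old_cases_touchees : Prop := ∀ (x : Int) (y : Int) (rayon : Int) (minx : Int) (maxx : Int) (miny : Int) (maxy : Int), Dom_old_cases_touchees x y rayon minx maxx miny maxy → Spec_old_cases_touchees x y rayon minx maxx miny maxy (old_cases_touchees x y rayon minx maxx miny maxy)

-- ===== LEMMAS AND PROOFS =====

-- A's inner loop appends the row, filtered by the skip test
theorem inner_foldl_eq (x y i : Int) (lj : List Int) (acc : List (Int × Int)) :
    lj.foldl (fun coords j => if j = y ∧ i = x then coords else coords ++ [(i, j)]) acc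
      = acc ++ (lj.filter (fun j => !(decide (j = y ∧ i = x)))).map (fun j => (i, j)) := by
  induction lj generalizing acc with
  | nil => simp
  | cons j tl ih =>
    rw [List.foldl_cons]
    by_cases h : j = y ∧ i = x
    · rw [if_pos h, ih]; simp [h]
    · rw [if_neg h, ih]
      have h' := not_and_or.mp h
      simp [h']

-- A's outer loop is a flatMap of filtered rows
theorem a_eq_flatMap (x y : Int) (li lj : List Int) :
    li.foldl (fun coords i =>
        lj.foldl (fun coords j => if j = y ∧ i = x then coords else coords ++ [(i, j)]) coords) []
      = li.flatMap (fun i => (lj.filter (fun j => !(decide (j = y ∧ i = x)))).map (fun j => (i, j))) := by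
  have main : ∀ (li : List Int) (acc : List (Int × Int)),
      li.foldl (fun coords i =>
        lj.foldl (fun coords j => if j = y ∧ i = x then coords else coords ++ [(i, j)]) coords) acc
      = acc ++ li.flatMap (fun i => (lj.filter (fun j => !(decide (j = y ∧ i = x)))).map (fun j => (i, j))) := by
    intro li
    induction li with
    | nil => simp
    | cons i tl ih =>
      intro acc
      rw [List.foldl_cons, inner_foldl_eq, ih, List.flatMap_cons, List.append_assoc]
  simpa using main li []

-- splitting any clamped range into the parts strictly below c, exactly c, strictly above c
theorem pyRange_split3 (a b c : Int) :
    PySem.List.pyRange a b 1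
      = PySem.List.pyRange a (min b c) 1 ++ PySem.List.pyRange (max a c) (min b (c + 1)) 1
          ++ PySem.List.pyRange (max a (c + 1)) b 1 := by
  rcases lt_trichotomy c a with h | h | h
  · rw [PySem.List.pyRange_one_eq_nil (a := a) (b := min b c) (by omega),
        PySem.List.pyRange_one_eq_nil (a := max a c) (b := min b (c + 1)) (by omega)]
    have : max a (c + 1) = a := by omega
    rw [this]; simp
  · subst h
    by_cases hb : c < b
    · have h1 : min b c = c := by omega
      have h2 : max c c = c := by omega
      have h3 : min b (c + 1) = c + 1 := by omega
      have h4 : max c (c + 1) = c + 1 := by omega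
      rw [h1, h2, h3, h4, PySem.List.pyRange_one_cons hb,
          PySem.List.pyRange_one_eq_nil (a := c) (b := c) (le_refl c),
          PySem.List.pyRange_one_singleton]
      simp
    · rw [PySem.List.pyRange_one_eq_nil (a := c) (b := b) (by omega),
          PySem.List.pyRange_one_eq_nil (a := c) (b := min b c) (by omega),
          PySem.List.pyRange_one_eq_nil (a := max c c) (b := min b (c + 1)) (by omega),
          PySem.List.pyRange_one_eq_nil (a := max c (c + 1)) (b := b) (by omega)]
      simp
  · by_cases hb : c < b
    · have h1 : min b c = c := by omega
      have h2 : max a c = c := by omega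
      have h3 : min b (c + 1) = c + 1 := by omega
      have h4 : max a (c + 1) = c + 1 := by omega
      rw [h1, h2, h3, h4,
          PySem.List.pyRange_one_append a c b (by omega) (by omega),
          PySem.List.pyRange_one_append c (c + 1) b (by omega) (by omega), List.append_assoc]
    · have h1 : min b c = b := by omega
      rw [h1,
          PySem.List.pyRange_one_eq_nil (a := max a c) (b := min b (c + 1)) (by omega),
          PySem.List.pyRange_one_eq_nil (a := max a (c + 1)) (b := b) (by omega)]
      simp

-- when the row index is not x, the skip test never fires
theorem filter_row_all (x y i : Int) (lj : List Int) (h : i ≠ x) :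
    lj.filter (fun j => !(decide (j = y ∧ i = x))) = lj := by
  apply List.filter_eq_self.mpr
  intro j _
  simp [h]

-- the center row, filtered, is the two column ranges around y
theorem filter_center_row (x y a b : Int) :
    (PySem.List.pyRange a b 1).filter (fun j => !(decide (j = y ∧ x = x)))
      = PySem.List.pyRange a (min b y) 1 ++ PySem.List.pyRange (max a (y + 1)) b 1 := by
  rw [pyRange_split3 a b y, List.filter_append, List.filter_append]
  have hlo : (PySem.List.pyRange a (min b y) 1).filter (fun j => !(decide (j = y ∧ x = x)))
      = PySem.List.pyRange a (min b y) 1 := by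
    apply List.filter_eq_self.mpr
    intro j hj
    rw [PySem.List.mem_pyRange_one] at hj
    have : j ≠ y := by omega
    simp [this]
  have hmid : (PySem.List.pyRange (max a y) (min b (y + 1)) 1).filter
        (fun j => !(decide (j = y ∧ x = x))) = [] := by
    apply List.filter_eq_nil_iff.mpr
    intro j hj
    rw [PySem.List.mem_pyRange_one] at hj
    have : j = y := by omega
    simp [this]
  have hhi : (PySem.List.pyRange (max a (y + 1)) b 1).filter (fun j => !(decide (j = y ∧ x = x)))
      = PySem.List.pyRange (max a (y + 1)) b 1 := by
    apply List.filter_eq_self.mpr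
    intro j hj
    rw [PySem.List.mem_pyRange_one] at hj
    have : j ≠ y := by omega
    simp [this]
  rw [hlo, hmid, hhi]
  simp

-- ===== VERDICT (by name: the statement is the Claim_ definition above) =====
theorem old_cases_touchees_spec : Claim_equal_old_cases_touchees := by
  intro x y rayon minx maxx miny maxy _
  unfold Spec_old_cases_touchees old_cases_touchees old_cases_touchees_alt
  set loI := max minx (x - rayon) with hloI
  set hiI := min maxx (x + rayon + 1) with hhiI
  set loJ := max miny (y - rayon) with hloJ
  set hiJ := min maxy (y + rayon + 1) with hhiJ
  simp only [PySem.List.foldl_append_eq_flatMap, List.nil_append]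
  rw [a_eq_flatMap, pyRange_split3 loI hiI x, List.flatMap_append, List.flatMap_append]
  congr 1
  · congr 1
    · -- rows strictly below x: the filter keeps everything
      apply List.flatMap_congr
      intro i hi
      rw [PySem.List.mem_pyRange_one] at hi
      rw [filter_row_all x y i _ (by omega)]
    · -- the center row: filtered row = the two column ranges
      apply List.flatMap_congr
      intro i hi
      rw [PySem.List.mem_pyRange_one] at hi
      have hix : i = x := by omega
      subst hix
      rw [filter_center_row, List.map_append]
  · -- rows strictly above x
    apply List.flatMap_congr
    intro i hi
    rw [PySem.List.mem_pyRange_one] at hi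
    rw [filter_row_all x y i _ (by omega)]
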